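-- pv_equiv track=rewrite | github.com/Levigin/Code_wars_solutions | 5kyu/K-primes.py | count_Kprimes
-- ===== SOURCE A (Python) =====
-- def count_Kprimes(k, start, nd):
--     result = []
--
--     for i in range(start, nd + 1):
--         count = 2
--         list_count = []
--         curr_i = i
--         while count * count <= curr_i:
--             while curr_i % count == 0:
--                 curr_i //= count
--                 list_count.append(count)
--             count += 1
--
--         if curr_i > 1:
--             list_count.append(curr_i)
--         if len(list_count) == k:
--             result.append(i)
--
--     return result
-- ===== SOURCE B (Python) =====
-- def count_Kprimes(k, start, nd):
--     # Segmented sieve: keep a residual and a factor count for every number in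
--     # [max(start,2), nd]; for each candidate divisor p up to sqrt(nd), walk only
--     # the multiples of p in the segment and divide p out there, then read off
--     # the numbers whose factor count (plus 1 for a residual > 1) equals k.
--     lo = max(start, 2)
--     res = list(range(lo, nd + 1))
--     cnt = [0] * len(res)
--     p = 2
--     while p * p <= nd:
--         j = ((lo + p - 1) // p) * p - lo  # index of the first multiple of p
--         while j < len(res):
--             while res[j] % p == 0:
--                 res[j] //= p
--                 cnt[j] += 1
--             j += p
--         p += 1
--     out = []
--     for i in range(start, nd + 1):
--         if i < 2:
--             c = 0
--         else:
--             c = cnt[i - lo] + (1 if res[i - lo] > 1 else 0)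
--         if c == k:
--             out.append(i)
--     return out
-- ===== Notes on version B (the rewrite author's own statement) =====
-- stated objective: faster
-- what changed: B replaces A's per-number trial division (rebuilding a factor list for every i) with a segmented sieve: one residual/count array over [max(start,2), nd], an outer loop over divisors p up to sqrt(nd) whose inner loop visits only the multiples of p in the segment, then a final filter on the counts.
import Mathlib
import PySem

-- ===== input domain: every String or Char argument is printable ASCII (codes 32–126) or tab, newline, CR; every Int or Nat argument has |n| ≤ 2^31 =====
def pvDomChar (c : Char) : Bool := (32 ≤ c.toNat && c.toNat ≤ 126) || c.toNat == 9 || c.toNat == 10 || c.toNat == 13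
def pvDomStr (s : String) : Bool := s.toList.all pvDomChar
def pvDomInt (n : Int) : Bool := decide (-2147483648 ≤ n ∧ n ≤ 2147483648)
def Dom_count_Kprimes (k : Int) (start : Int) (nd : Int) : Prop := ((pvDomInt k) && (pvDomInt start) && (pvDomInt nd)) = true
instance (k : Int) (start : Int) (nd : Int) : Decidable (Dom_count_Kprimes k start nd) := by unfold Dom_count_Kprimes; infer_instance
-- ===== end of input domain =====

-- B replaces A's per-number trial division with a segmented sieve over [max(start,2), nd]:
-- an outer loop over divisors p ≤ sqrt(nd) whose inner loop touches only the multiples of p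
-- in a shared residual/count array (objective: faster, measured asymptotic).

-- termination helpers for the loops (cited in decreasing_by so the definitions
-- carry only small proof terms)
theorem pvEdivLt (a b : Int) (ha : 0 < a) (hb : 1 < b) : a / b < a := by
  have h0 := Int.mul_ediv_add_emod a b
  have h1 := Int.emod_nonneg a (by omega : b ≠ 0)
  have h2 := Int.emod_lt_of_pos a (by omega : 0 < b)
  have h3 : 0 ≤ a / b := Int.ediv_nonneg (by omega) (by omega)
  nlinarith

theorem pvDivDec (d n : Int) (h : PySem.Int.mod n d = 0 ∧ 1 ≤ n ∧ 2 ≤ d) :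
    (PySem.Int.floordiv n d).toNat < n.toNat := by
  obtain ⟨h1, h2, h3⟩ := h
  have hd : d ∣ n := (PySem.Int.mod_eq_zero_iff_dvd _ _).mp h1
  have hge : d ≤ n := Int.le_of_dvd (by omega) hd
  rw [PySem.Int.floordiv_eq_ediv_of_pos (by omega)]
  have hlt : n / d < n := pvEdivLt n d (by omega) (by omega)
  have hnn : 0 ≤ n / d := Int.ediv_nonneg (by omega) (by omega)
  omega

-- square-root-bounded loops `while p * p <= nd: …; p += 1` terminate
theorem pvSqDec (p nd : Int) (h : p * p ≤ nd ∧ 2 ≤ p) :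
    (nd + 1 - (p + 1)).toNat < (nd + 1 - p).toNat := by
  obtain ⟨h1, h2⟩ := h
  have : p ≤ p * p := by nlinarith
  omega

-- ===== PORT A =====
-- inner `while curr_i % count == 0: curr_i //= count; list_count.append(count)`
-- (the `1 ≤ curr ∧ 2 ≤ count` conjuncts are totality guards only; they hold at every
--  reachable call and the loop body never reads them)
def pvA_inner (count curr : Int) (lst : List Int) : Int × List Int :=
  if h : PySem.Int.mod curr count = 0 ∧ 1 ≤ curr ∧ 2 ≤ count then
    pvA_inner count (PySem.Int.floordiv curr count) (lst ++ [count])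
  else (curr, lst)
termination_by curr.toNat
decreasing_by exact pvDivDec count curr h

-- the reduced value never grows (used for termination of the outer loop)
theorem pvA_inner_fst_le (count curr : Int) (lst : List Int) :
    (pvA_inner count curr lst).1 ≤ curr := by
  fun_induction pvA_inner count curr lst with
  | case1 curr lst h ih =>
    obtain ⟨h1, h2, h3⟩ := h
    have hd : count ∣ curr := (PySem.Int.mod_eq_zero_iff_dvd _ _).mp h1
    refine le_trans ih ?_
    rw [PySem.Int.floordiv_eq_ediv_of_pos (by omega)]
    exact le_of_lt (pvEdivLt curr count (by omega) (by omega))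
  | case2 curr lst h => exact le_rfl

theorem pvA_outer_dec (count curr : Int) (lst : List Int)
    (h : count * count ≤ curr ∧ 2 ≤ count) :
    ((pvA_inner count curr lst).1 + 1 - (count + 1)).toNat < (curr + 1 - count).toNat := by
  obtain ⟨h1, h2⟩ := h
  have hle := pvA_inner_fst_le count curr lst
  have hcc : count ≤ count * count := by nlinarith
  omega

-- outer `while count * count <= curr_i: <inner>; count += 1`
-- (the `2 ≤ count` conjunct is a totality guard only; count starts at 2 and only grows)
def pvA_outer (count curr : Int) (lst : List Int) : Int × List Int :=
  if h : count * count ≤ curr ∧ 2 ≤ count then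
    pvA_outer (count + 1) (pvA_inner count curr lst).1 (pvA_inner count curr lst).2
  else (curr, lst)
termination_by (curr + 1 - count).toNat
decreasing_by exact pvA_outer_dec count curr lst h

def count_Kprimes (k : Int) (start : Int) (nd : Int) : List Int :=
  (PySem.List.pyRange start (nd + 1) 1).foldl (fun result i =>
    let r := pvA_outer 2 i []
    let list_count := if r.1 > 1 then r.2 ++ [r.1] else r.2
    if (list_count.length : Int) = k then result ++ [i] else result) []

-- ===== PORT B =====
-- innermost `while res[j] % p == 0: res[j] //= p; cnt[j] += 1`, on the cell's values
-- (the `1 ≤ n ∧ 2 ≤ p` conjuncts are totality guards only)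
def pvB_inner (p n c : Int) : Int × Int :=
  if h : PySem.Int.mod n p = 0 ∧ 1 ≤ n ∧ 2 ≤ p then
    pvB_inner p (PySem.Int.floordiv n p) (c + 1)
  else (n, c)
termination_by n.toNat
decreasing_by exact pvDivDec p n h

-- `while j < len(res): <drain cell j>; j += p`
-- (the `0 ≤ j ∧ 1 ≤ p` conjuncts are totality guards only: j starts at a
--  nonnegative index and p ≥ 2 at every call)
def pvB_mults (p j : Int) (res cnt : Array Int) : Array Int × Array Int :=
  if h : j < (res.size : Int) ∧ 0 ≤ j ∧ 1 ≤ p then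
    let d := pvB_inner p (res.getD j.toNat 0) (cnt.getD j.toNat 0)
    pvB_mults p (j + p) (res.setIfInBounds j.toNat d.1) (cnt.setIfInBounds j.toNat d.2)
  else (res, cnt)
termination_by ((res.size : Int) - j).toNat
decreasing_by simp only [Array.size_setIfInBounds]; omega

-- `while p * p <= nd: j = ((lo+p-1)//p)*p - lo; <multiples loop>; p += 1`
-- (the `2 ≤ p` conjunct is a totality guard only; p starts at 2 and only grows)
def pvB_ps (p nd lo : Int) (res cnt : Array Int) : Array Int × Array Int :=
  if h : p * p ≤ nd ∧ 2 ≤ p then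
    pvB_ps (p + 1) nd lo
      (pvB_mults p (PySem.Int.floordiv (lo + p - 1) p * p - lo) res cnt).1
      (pvB_mults p (PySem.Int.floordiv (lo + p - 1) p * p - lo) res cnt).2
  else (res, cnt)
termination_by (nd + 1 - p).toNat
decreasing_by exact pvSqDec p nd h

-- `cnt[i-lo]` / `res[i-lo]`: rendered with `.toNat` since in B this index is
-- provably nonnegative whenever it is read (i ≥ 2 and i ≥ start give i ≥ lo)
def count_Kprimes_alt (k : Int) (start : Int) (nd : Int) : List Int :=
  let lo := max start 2
  let res := (PySem.List.pyRange lo (nd + 1) 1).toArray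
  let cnt := Array.replicate res.size (0 : Int)
  let s := pvB_ps 2 nd lo res cnt
  (PySem.List.pyRange start (nd + 1) 1).foldl (fun out i =>
    let c : Int := if i < 2 then 0
      else s.2.getD (i - lo).toNat 0 + (if s.1.getD (i - lo).toNat 0 > 1 then 1 else 0)
    if c = k then out ++ [i] else out) []

-- ===== PRECONDITION & SPEC =====
def Spec_count_Kprimes (k : Int) (start : Int) (nd : Int) (out : List Int) : Prop := out = count_Kprimes_alt k start nd
instance (k : Int) (start : Int) (nd : Int) (out : List Int) : Decidable (Spec_count_Kprimes k start nd out) := by unfold Spec_count_Kprimes; infer_instance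

-- ===== CLAIM (what is proved, stated in full; the proofs are below) =====
def Claim_equal_count_Kprimes : Prop := ∀ (k : Int) (start : Int) (nd : Int), Dom_count_Kprimes k start nd → Spec_count_Kprimes k start nd (count_Kprimes k start nd)

-- ===== LEMMAS AND PROOFS =====

theorem pvEdivPos (a b : Int) (ha : 1 ≤ a) (hb : 2 ≤ b) (hd : b ∣ a) : 1 ≤ a / b := by
  have hc := Int.ediv_mul_cancel hd
  by_contra h
  push_neg at h
  nlinarith

theorem pvB_inner_fst_le (p n c : Int) : (pvB_inner p n c).1 ≤ n := by
  fun_induction pvB_inner p n c with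
  | case1 n c h ih =>
    obtain ⟨h1, h2, h3⟩ := h
    refine le_trans ih ?_
    rw [PySem.Int.floordiv_eq_ediv_of_pos (by omega)]
    exact le_of_lt (pvEdivLt n p (by omega) (by omega))
  | case2 n c h => exact le_rfl

theorem pvB_inner_fst_dvd (p n c : Int) : (pvB_inner p n c).1 ∣ n := by
  fun_induction pvB_inner p n c with
  | case1 n c h ih =>
    obtain ⟨h1, h2, h3⟩ := h
    have hd : p ∣ n := (PySem.Int.mod_eq_zero_iff_dvd _ _).mp h1
    refine dvd_trans ih ?_
    rw [PySem.Int.floordiv_eq_ediv_of_pos (by omega)]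
    exact ⟨p, (Int.ediv_mul_cancel hd).symm⟩
  | case2 n c h => exact dvd_rfl

theorem pvB_inner_fst_pos (p n c : Int) (hn : 1 ≤ n) : 1 ≤ (pvB_inner p n c).1 := by
  fun_induction pvB_inner p n c with
  | case1 n c h ih =>
    obtain ⟨h1, h2, h3⟩ := h
    have hd : p ∣ n := (PySem.Int.mod_eq_zero_iff_dvd _ _).mp h1
    apply ih
    rw [PySem.Int.floordiv_eq_ediv_of_pos (by omega)]
    exact pvEdivPos n p h2 h3 hd
  | case2 n c h => exact hn

theorem pvB_inner_fst_not_dvd (p n c : Int) (hn : 1 ≤ n) (hp : 2 ≤ p) :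
    ¬ p ∣ (pvB_inner p n c).1 := by
  fun_induction pvB_inner p n c with
  | case1 n c h ih =>
    obtain ⟨h1, h2, h3⟩ := h
    have hd : p ∣ n := (PySem.Int.mod_eq_zero_iff_dvd _ _).mp h1
    apply ih
    rw [PySem.Int.floordiv_eq_ediv_of_pos (by omega)]
    exact pvEdivPos n p h2 h3 hd
  | case2 n c h =>
    intro hd
    exact h ⟨(PySem.Int.mod_eq_zero_iff_dvd _ _).mpr hd, hn, hp⟩

theorem pvB_inner_noop (p n c : Int) (h : ¬ p ∣ n) : pvB_inner p n c = (n, c) := by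
  rw [pvB_inner, dif_neg]
  intro hcon
  exact h ((PySem.Int.mod_eq_zero_iff_dvd _ _).mp hcon.1)

-- A's list-building inner loop and B's counting inner loop reduce identically and
-- append exactly as many factors as B counts
theorem pvInner_corr (d n : Int) (l : List Int) (x : Int) :
    (pvA_inner d n l).1 = (pvB_inner d n x).1 ∧
    ((pvA_inner d n l).2.length : Int) + x = (l.length : Int) + (pvB_inner d n x).2 := by
  fun_induction pvA_inner d n l generalizing x with
  | case1 n l h ih =>
    rw [pvB_inner, dif_pos h]
    obtain ⟨hfst, hsnd⟩ := ih (x + 1)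
    refine ⟨hfst, ?_⟩
    simp only [List.length_append, List.length_cons, List.length_nil] at hsnd ⊢
    push_cast at hsnd ⊢
    omega
  | case2 n l h =>
    rw [pvB_inner, dif_neg h]
    simp

-- scalar view of B's sieve at one cell: fold pvB_inner over p = p0, p0+1, … while p*p ≤ nd
def pvScalar (p nd n c : Int) : Int × Int :=
  if h : p * p ≤ nd ∧ 2 ≤ p then
    pvScalar (p + 1) nd (pvB_inner p n c).1 (pvB_inner p n c).2
  else (n, c)
termination_by (nd + 1 - p).toNat
decreasing_by exact pvSqDec p nd h

theorem pvB_inner_self (p x : Int) (hp : 2 ≤ p) : pvB_inner p p x = (1, x + 1) := by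
  rw [pvB_inner, dif_pos ⟨(PySem.Int.mod_eq_zero_iff_dvd _ _).mpr dvd_rfl, by omega, hp⟩]
  rw [PySem.Int.floordiv_eq_ediv_of_pos (by omega), Int.ediv_self (by omega)]
  exact pvB_inner_noop p 1 (x + 1) (fun hd => by
    have := Int.le_of_dvd one_pos hd; omega)

-- main per-cell correspondence: A's trial division from candidate c on residual r
-- (stopping at sqrt(r)) counts, with its trailing prime, exactly what B's sieve fold
-- (stopping at sqrt(nd)) counts with its trailing residual, provided r ≤ nd and no
-- divisor below c remains in r
theorem pvScalar_corr (nd : Int) (μ : Nat) : ∀ (c r : Int) (l : List Int) (x : Int),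
    (nd + 1 - c).toNat ≤ μ → 2 ≤ c → 1 ≤ r → r ≤ nd →
    (∀ d : Int, 2 ≤ d → d < c → ¬ d ∣ r) →
    ((pvA_outer c r l).2.length : Int) + (if (pvA_outer c r l).1 > 1 then 1 else 0) + x
      = (l.length : Int) + (pvScalar c nd r x).2 + (if (pvScalar c nd r x).1 > 1 then 1 else 0) := by
  induction μ with
  | zero =>
    intro c r l x hμ hc hr hrnd hinv
    have hstop : ¬ (c * c ≤ nd ∧ 2 ≤ c) := by
      intro hg
      have : c ≤ c * c := by nlinarith
      omega
    rw [pvScalar, dif_neg hstop, pvA_outer, dif_neg (fun hg => hstop ⟨le_trans hg.1 hrnd, hg.2⟩)]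
    simp only
    omega
  | succ μ ih =>
    intro c r l x hμ hc hr hrnd hinv
    by_cases hB : c * c ≤ nd
    · rw [pvScalar, dif_pos ⟨hB, hc⟩]
      have hcnd : c ≤ nd := le_trans (by nlinarith) hB
      by_cases hA : c * c ≤ r
      · rw [pvA_outer, dif_pos ⟨hA, hc⟩]
        obtain ⟨hfst, hsnd⟩ := pvInner_corr c r l x
        have hpos := pvB_inner_fst_pos c r x hr
        have hle := pvB_inner_fst_le c r x
        have hdvd := pvB_inner_fst_dvd c r x
        rw [hfst]
        have hih := ih (c + 1) (pvB_inner c r x).1 (pvA_inner c r l).2 (pvB_inner c r x).2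
          (by omega) (by omega) hpos (by omega)
          (fun d hd1 hd2 hdd => by
            by_cases hdc : d = c
            · exact pvB_inner_fst_not_dvd c r x hr hc (hdc ▸ hdd)
            · exact hinv d hd1 (by omega) (dvd_trans hdd hdvd))
        omega
      · rw [pvA_outer, dif_neg (fun hg => hA hg.1)]
        simp only
        by_cases hdc : c ∣ r
        · obtain ⟨m, hm⟩ := hdc
          have hm1 : 1 ≤ m := by nlinarith
          have hmdvd : m ∣ r := ⟨c, by rw [hm]; ring⟩
          have hmeq : m = 1 := by
            by_contra hne
            have hmc : m < c := by nlinarith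
            exact hinv m (by omega) hmc hmdvd
          have hrc : r = c := by rw [hm, hmeq, mul_one]
          subst hrc
          have hf : (pvB_inner r r x).1 = 1 := by rw [pvB_inner_self r x hc]
          have hs : (pvB_inner r r x).2 = x + 1 := by rw [pvB_inner_self r x hc]
          rw [hf, hs]
          have hih := ih (r + 1) 1 l (x + 1) (by omega) (by omega) le_rfl (by omega)
            (fun d hd1 hd2 hdd => by
              have := Int.le_of_dvd one_pos hdd; omega)
          have hstopA : pvA_outer (r + 1) 1 l = (1, l) := by
            rw [pvA_outer, dif_neg]
            intro hg
            nlinarith [hg.1, hg.2]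
          rw [hstopA] at hih
          simp only at hih
          have h1 : ¬ ((1:Int) > 1) := by omega
          rw [if_neg h1] at hih
          rw [if_pos (by omega : r > 1)]
          omega
        · have hf : (pvB_inner c r x).1 = r := by rw [pvB_inner_noop c r x hdc]
          have hs : (pvB_inner c r x).2 = x := by rw [pvB_inner_noop c r x hdc]
          rw [hf, hs]
          have hih := ih (c + 1) r l x (by omega) (by omega) hr hrnd
            (fun d hd1 hd2 hdd => by
              by_cases hdceq : d = c
              · subst hdceq; exact hdc hdd
              · exact hinv d hd1 (by omega) hdd)
          have hstopA : pvA_outer (c + 1) r l = (r, l) := by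
            rw [pvA_outer, dif_neg]
            intro hg
            nlinarith [hg.1, hg.2]
          rw [hstopA] at hih
          simp only at hih
          omega
    · have hstop : ¬ (c * c ≤ nd ∧ 2 ≤ c) := fun hg => hB hg.1
      rw [pvScalar, dif_neg hstop, pvA_outer, dif_neg (fun hg => hB (le_trans hg.1 hrnd))]
      simp only
      omega

-- A's per-element factor-list length (including the trailing prime) equals B's
-- per-cell sieve count (including the trailing residual), for 2 ≤ i ≤ nd
theorem pvElem (nd i : Int) (h2 : 2 ≤ i) (hle : i ≤ nd) :
    (((if (pvA_outer 2 i []).1 > 1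
        then (pvA_outer 2 i []).2 ++ [(pvA_outer 2 i []).1]
        else (pvA_outer 2 i []).2).length : Int))
      = (pvScalar 2 nd i 0).2 + (if (pvScalar 2 nd i 0).1 > 1 then 1 else 0) := by
  have h := pvScalar_corr nd (nd + 1 - 2).toNat 2 i [] 0 le_rfl le_rfl (by omega) hle
    (fun d hd1 hd2 _ => by omega)
  simp only [List.length_nil] at h
  by_cases hgt : (pvA_outer 2 i []).1 > 1
  · rw [if_pos hgt]
    rw [if_pos hgt] at h
    simp only [List.length_append, List.length_cons, List.length_nil] at *
    push_cast at *
    omega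
  · rw [if_neg hgt]
    rw [if_neg hgt] at h
    omega

-- Array.getD facts for the sieve's cell updates
theorem pvGetD_setIfInBounds_ne (a : Array Int) (n q : Nat) (x : Int) (h : n ≠ q) :
    (a.setIfInBounds n x).getD q 0 = a.getD q 0 := by
  rw [Array.getD_eq_getD_getElem?, Array.getD_eq_getD_getElem?,
    Array.getElem?_setIfInBounds_ne h]

theorem pvGetD_setIfInBounds_self (a : Array Int) (n : Nat) (x : Int) (hn : n < a.size) :
    (a.setIfInBounds n x).getD n 0 = x := by
  rw [Array.getD_eq_getD_getElem?, Array.getElem?_setIfInBounds_self, if_pos hn]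
  rfl

theorem pvGetD_toArray (l : List Int) (q : Nat) :
    l.toArray.getD q 0 = l.getD q 0 := by
  rw [Array.getD_eq_getD_getElem?, List.getD]; simp

theorem pvGetD_replicate (n q : Nat) (h : q < n) :
    (Array.replicate n (0 : Int)).getD q 0 = 0 := by
  rw [Array.getD_eq_getD_getElem?, Array.getElem?_replicate]
  simp [h]

-- B's multiples pass, pointwise: cell q is drained iff it is one of the visited
-- positions j, j+p, j+2p, …; other cells are untouched; lengths are preserved
theorem pvMults_get : ∀ (p j : Int) (res cnt : Array Int), 1 ≤ p → 0 ≤ j →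
    cnt.size = res.size →
    (pvB_mults p j res cnt).1.size = res.size ∧
    (pvB_mults p j res cnt).2.size = res.size ∧
    ∀ q : Nat, q < res.size →
      ((pvB_mults p j res cnt).1.getD q 0, (pvB_mults p j res cnt).2.getD q 0)
        = if j ≤ (q : Int) ∧ p ∣ ((q : Int) - j)
          then pvB_inner p (res.getD q 0) (cnt.getD q 0)
          else (res.getD q 0, cnt.getD q 0) := by
  intro p j res cnt
  fun_induction pvB_mults p j res cnt with
  | case1 j res cnt h d ih =>
    intro hp hj hlen
    obtain ⟨hjlt, hj0, hp1⟩ := h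
    have hlen1 : (res.setIfInBounds j.toNat d.1).size = res.size := by simp
    have hlen2 : (cnt.setIfInBounds j.toNat d.2).size = cnt.size := by simp
    obtain ⟨ih1, ih2, ih3⟩ := ih hp (by omega) (by rw [hlen1, hlen2, hlen])
    refine ⟨by rw [ih1, hlen1], by rw [ih2, hlen1], ?_⟩
    intro q hq
    have hq' : q < (res.setIfInBounds j.toNat d.1).size := by rw [hlen1]; exact hq
    have hih := ih3 q hq'
    by_cases hqj : q = j.toNat
    · -- the visited cell: the recursion never touches it again
      subst hqj
      rw [if_neg (fun hcon => absurd hcon.1 (by omega))] at hih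
      rw [hih]
      have hjnlt : j.toNat < res.size := by omega
      have hjnlt2 : j.toNat < cnt.size := by omega
      rw [pvGetD_setIfInBounds_self res j.toNat d.1 hjnlt,
        pvGetD_setIfInBounds_self cnt j.toNat d.2 hjnlt2,
        if_pos ⟨by omega, by
          have hz : ((j.toNat : Int)) - j = 0 := by omega
          rw [hz]; exact dvd_zero p⟩]
    · -- an untouched cell: the write does not change it, conditions coincide
      rw [pvGetD_setIfInBounds_ne res j.toNat q d.1 (fun he => hqj he.symm),
        pvGetD_setIfInBounds_ne cnt j.toNat q d.2 (fun he => hqj he.symm)] at hih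
      rw [hih]
      have hqje : (q : Int) ≠ j := by
        intro he; apply hqj; omega
      by_cases hc : j ≤ (q : Int) ∧ p ∣ ((q : Int) - j)
      · have hge : j + p ≤ (q : Int) := by
          have hpos : 0 < (q : Int) - j := by omega
          have := Int.le_of_dvd hpos hc.2
          omega
        have hdvd' : p ∣ ((q : Int) - (j + p)) := by
          have : ((q : Int) - (j + p)) = ((q : Int) - j) + (-1) * p := by ring
          rw [this]
          exact dvd_add hc.2 ⟨-1, by ring⟩
        rw [if_pos ⟨hge, hdvd'⟩, if_pos hc]
      · have hc' : ¬ (j + p ≤ (q : Int) ∧ p ∣ ((q : Int) - (j + p))) := by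
          intro hcon
          apply hc
          refine ⟨by omega, ?_⟩
          have : ((q : Int) - j) = ((q : Int) - (j + p)) + 1 * p := by ring
          rw [this]
          exact dvd_add hcon.2 ⟨1, by ring⟩
        rw [if_neg hc', if_neg hc]
  | case2 j res cnt h =>
    intro hp hj hlen
    refine ⟨rfl, hlen, ?_⟩
    intro q hq
    have hlenle : (res.size : Int) ≤ j := by
      by_contra hlt
      exact h ⟨by omega, hj, hp⟩
    rw [if_neg (by intro hcon; omega)]

theorem pvDvdBound (p x : Int) (hp : 0 < p) (hx : -p < x) (hd : p ∣ x) : 0 ≤ x := by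
  obtain ⟨t, ht⟩ := hd
  by_contra h
  push_neg at h
  have ht0 : t ≤ -1 := by nlinarith
  nlinarith

theorem pvPs_get (nd lo : Int) (μ : Nat) : ∀ (p : Int) (res cnt : Array Int),
    (nd + 1 - p).toNat ≤ μ → 2 ≤ p →
    cnt.size = res.size →
    (∀ q : Nat, q < res.size → 1 ≤ res.getD q 0 ∧ res.getD q 0 ∣ (lo + (q : Int))) →
    (pvB_ps p nd lo res cnt).1.size = res.size ∧
    (pvB_ps p nd lo res cnt).2.size = res.size ∧
    ∀ q : Nat, q < res.size →
      ((pvB_ps p nd lo res cnt).1.getD q 0, (pvB_ps p nd lo res cnt).2.getD q 0)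
        = pvScalar p nd (res.getD q 0) (cnt.getD q 0) := by
  induction μ with
  | zero =>
    intro p res cnt hμ hp hlen hinv
    have hstop : ¬ (p * p ≤ nd ∧ 2 ≤ p) := by
      intro hg
      have : p ≤ p * p := by nlinarith
      omega
    rw [pvB_ps, dif_neg hstop]
    exact ⟨rfl, hlen, fun q hq => by rw [pvScalar, dif_neg hstop]⟩
  | succ μ ih =>
    intro p res cnt hμ hp hlen hinv
    by_cases hB : p * p ≤ nd
    · rw [pvB_ps, dif_pos ⟨hB, hp⟩]
      have hpnd : p ≤ nd := le_trans (by nlinarith) hB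
      -- the first visited position j0 = ((lo+p-1)//p)*p - lo: the least multiple of p
      -- that is ≥ lo, shifted to an index
      have hfd : PySem.Int.floordiv (lo + p - 1) p = (lo + p - 1) / p :=
        PySem.Int.floordiv_eq_ediv_of_pos (by omega)
      have hdm : (lo + p - 1) / p * p + (lo + p - 1) % p = lo + p - 1 := by
        rw [mul_comm]; exact Int.ediv_add_emod _ _
      have hm0 := Int.emod_nonneg (lo + p - 1) (by omega : p ≠ 0)
      have hm1 := Int.emod_lt_of_pos (lo + p - 1) (by omega : 0 < p)
      have hmlo : lo ≤ PySem.Int.floordiv (lo + p - 1) p * p := by rw [hfd]; omega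
      have hmhi : PySem.Int.floordiv (lo + p - 1) p * p < lo + p := by rw [hfd]; omega
      have hmdvd : p ∣ PySem.Int.floordiv (lo + p - 1) p * p := Dvd.intro_left _ rfl
      obtain ⟨hl1, hl2, hpt⟩ := pvMults_get p (PySem.Int.floordiv (lo + p - 1) p * p - lo)
        res cnt (by omega) (by omega) hlen
      -- al cells are updated exactly by pvB_inner p
      have hcell : ∀ q : Nat, q < res.size →
          ((pvB_mults p (PySem.Int.floordiv (lo + p - 1) p * p - lo) res cnt).1.getD q 0,
           (pvB_mults p (PySem.Int.floordiv (lo + p - 1) p * p - lo) res cnt).2.getD q 0)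
            = pvB_inner p (res.getD q 0) (cnt.getD q 0) := by
        intro q hq
        rw [hpt q hq]
        have hsub : ((q : Int)) - (PySem.Int.floordiv (lo + p - 1) p * p - lo)
            = (lo + (q : Int)) - PySem.Int.floordiv (lo + p - 1) p * p := by ring
        by_cases hdq : p ∣ (lo + (q : Int))
        · have hdsub : p ∣ ((q : Int)) - (PySem.Int.floordiv (lo + p - 1) p * p - lo) := by
            rw [hsub]; exact dvd_sub hdq hmdvd
          rw [if_pos]
          refine ⟨?_, hdsub⟩
          -- j0 ≤ q: otherwise q - j0 is a negative multiple of p in (-p, 0)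
          have := pvDvdBound p _ (by omega) (by omega) hdsub
          omega
        · rw [if_neg, pvB_inner_noop]
          · intro hdr
            exact hdq (dvd_trans hdr (hinv q hq).2)
          · intro hcon
            apply hdq
            have : lo + (q : Int)
                = ((q : Int) - (PySem.Int.floordiv (lo + p - 1) p * p - lo))
                  + PySem.Int.floordiv (lo + p - 1) p * p := by ring
            rw [this]
            exact dvd_add hcon.2 hmdvd
      obtain ⟨ih1, ih2, ih3⟩ := ih (p + 1)
        (pvB_mults p (PySem.Int.floordiv (lo + p - 1) p * p - lo) res cnt).1
        (pvB_mults p (PySem.Int.floordiv (lo + p - 1) p * p - lo) res cnt).2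
        (by omega) (by omega) (by rw [hl1, hl2])
        (by
          intro q hq
          rw [hl1] at hq
          have h1 : (pvB_mults p (PySem.Int.floordiv (lo + p - 1) p * p - lo) res cnt).1.getD q 0
              = (pvB_inner p (res.getD q 0) (cnt.getD q 0)).1 := by
            have := congrArg Prod.fst (hcell q hq); simpa using this
          rw [h1]
          exact ⟨pvB_inner_fst_pos _ _ _ (hinv q hq).1,
            dvd_trans (pvB_inner_fst_dvd _ _ _) (hinv q hq).2⟩)
      refine ⟨by rw [ih1, hl1], by rw [ih2, hl1], ?_⟩
      intro q hq
      rw [ih3 q (by rw [hl1]; exact hq)]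
      have h1 : (pvB_mults p (PySem.Int.floordiv (lo + p - 1) p * p - lo) res cnt).1.getD q 0
          = (pvB_inner p (res.getD q 0) (cnt.getD q 0)).1 := by
        have := congrArg Prod.fst (hcell q hq); simpa using this
      have h2 : (pvB_mults p (PySem.Int.floordiv (lo + p - 1) p * p - lo) res cnt).2.getD q 0
          = (pvB_inner p (res.getD q 0) (cnt.getD q 0)).2 := by
        have := congrArg Prod.snd (hcell q hq); simpa using this
      rw [h1, h2]
      conv_rhs => rw [pvScalar, dif_pos ⟨hB, hp⟩]
    · have hstop : ¬ (p * p ≤ nd ∧ 2 ≤ p) := fun hg => hB hg.1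
      rw [pvB_ps, dif_neg hstop]
      exact ⟨rfl, hlen, fun q hq => by rw [pvScalar, dif_neg hstop]⟩

-- per-element assembly: A's factor-list length at i equals the count B reads off
-- its sieved arrays at index i - lo
theorem pvCell (start nd i : Int) (hs : start ≤ i) (hi : i < nd + 1) :
    (((if (pvA_outer 2 i []).1 > 1
        then (pvA_outer 2 i []).2 ++ [(pvA_outer 2 i []).1]
        else (pvA_outer 2 i []).2).length : Int))
      = (if i < 2 then 0
         else (pvB_ps 2 nd (max start 2) (PySem.List.pyRange (max start 2) (nd + 1) 1).toArray
                (Array.replicate (PySem.List.pyRange (max start 2) (nd + 1) 1).toArray.size (0 : Int))).2.getD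
                  (i - max start 2).toNat 0
           + (if (pvB_ps 2 nd (max start 2) (PySem.List.pyRange (max start 2) (nd + 1) 1).toArray
                (Array.replicate (PySem.List.pyRange (max start 2) (nd + 1) 1).toArray.size (0 : Int))).1.getD
                  (i - max start 2).toNat 0 > 1 then 1 else 0)) := by
  by_cases h2 : i < 2
  · have hA0 : pvA_outer 2 i [] = (i, []) := by
      rw [pvA_outer, dif_neg]
      intro hg
      omega
    rw [if_pos h2, hA0]
    norm_num
    omega
  · rw [if_neg h2]
    have hlo2 : 2 ≤ max start 2 := le_max_right _ _
    have hloi : max start 2 ≤ i := max_le hs (by omega)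
    have hlens : (PySem.List.pyRange (max start 2) (nd + 1) 1).toArray.size
        = ((nd + 1) - max start 2).toNat := by
      rw [List.size_toArray, PySem.List.length_pyRange_one]
    have hq : (i - max start 2).toNat
        < (PySem.List.pyRange (max start 2) (nd + 1) 1).toArray.size := by
      rw [hlens]; omega
    have hresq : ∀ q : Nat, q < (PySem.List.pyRange (max start 2) (nd + 1) 1).toArray.size →
        (PySem.List.pyRange (max start 2) (nd + 1) 1).toArray.getD q 0
          = max start 2 + (q : Int) := by
      intro q hq'
      rw [pvGetD_toArray, List.getD_eq_getElem _ _ (by rw [← List.size_toArray]; exact hq'),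
        PySem.List.getElem_pyRange_one]
    have hres : (PySem.List.pyRange (max start 2) (nd + 1) 1).toArray.getD
        (i - max start 2).toNat 0 = i := by
      rw [hresq _ hq]; omega
    have hcnt : (Array.replicate (PySem.List.pyRange (max start 2) (nd + 1) 1).toArray.size
        (0 : Int)).getD (i - max start 2).toNat 0 = 0 := pvGetD_replicate _ _ hq
    obtain ⟨_, _, hpt⟩ := pvPs_get nd (max start 2) (nd + 1 - 2).toNat 2
      (PySem.List.pyRange (max start 2) (nd + 1) 1).toArray
      (Array.replicate (PySem.List.pyRange (max start 2) (nd + 1) 1).toArray.size (0 : Int))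
      le_rfl le_rfl (Array.size_replicate ..)
      (by
        intro q' hq'
        rw [hresq q' hq']
        exact ⟨by omega, dvd_refl _⟩)
    have hpair := hpt (i - max start 2).toNat hq
    rw [hres, hcnt] at hpair
    have hc1 : (pvB_ps 2 nd (max start 2) (PySem.List.pyRange (max start 2) (nd + 1) 1).toArray
        (Array.replicate (PySem.List.pyRange (max start 2) (nd + 1) 1).toArray.size (0 : Int))).1.getD
          (i - max start 2).toNat 0 = (pvScalar 2 nd i 0).1 := by
      have := congrArg Prod.fst hpair; simpa using this
    have hc2 : (pvB_ps 2 nd (max start 2) (PySem.List.pyRange (max start 2) (nd + 1) 1).toArray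
        (Array.replicate (PySem.List.pyRange (max start 2) (nd + 1) 1).toArray.size (0 : Int))).2.getD
          (i - max start 2).toNat 0 = (pvScalar 2 nd i 0).2 := by
      have := congrArg Prod.snd hpair; simpa using this
    rw [hc1, hc2]
    exact pvElem nd i (by omega) (by omega)

-- ===== VERDICT (by name: the statement is the Claim_ definition above) =====
theorem count_Kprimes_spec : Claim_equal_count_Kprimes := by
  intro k start nd _
  show count_Kprimes k start nd = count_Kprimes_alt k start nd
  unfold count_Kprimes count_Kprimes_alt
  apply PySem.List.foldl_congr_mem
  intro acc i hmem
  rw [PySem.List.mem_pyRange_one] at hmem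
  have h := pvCell start nd i hmem.1 hmem.2
  simp only [h]
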